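-- pv_equiv track=rewrite | github.com/yucori/Algorithm | Programmers/Level 2/42578.py | solution
-- ===== SOURCE A (Python) =====
-- def solution(clothes):
--     answer = 1
--     type_list = []
--     cnt = []
--     for i in range(len(clothes)):
--         if clothes[i][1] not in type_list:
--             cnt.append(1)
--             type_list.append(clothes[i][1])
--         else:
--             cnt[type_list.index(clothes[i][1])] += 1
--     for i in range(len(cnt)):
--         answer *= (cnt[i]+1)
--
--     return answer-1
-- ===== SOURCE B (Python) =====
-- def solution(clothes):
--     def prod(types):
--         if not types:
--             return 1
--         t = types[0]
--         same = types.count(t)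
--         rest = [x for x in types if x != t]
--         return (same + 1) * prod(rest)
--     return prod([c[1] for c in clothes]) - 1
-- ===== Notes on version B (the rewrite author's own statement) =====
-- stated objective: alternative
-- what changed: Replaces A's tally loop over parallel type_list/cnt lists by a recursive partition: count the first remaining type, filter all its occurrences out, multiply (count+1) and recurse on the rest.
import Mathlib
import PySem

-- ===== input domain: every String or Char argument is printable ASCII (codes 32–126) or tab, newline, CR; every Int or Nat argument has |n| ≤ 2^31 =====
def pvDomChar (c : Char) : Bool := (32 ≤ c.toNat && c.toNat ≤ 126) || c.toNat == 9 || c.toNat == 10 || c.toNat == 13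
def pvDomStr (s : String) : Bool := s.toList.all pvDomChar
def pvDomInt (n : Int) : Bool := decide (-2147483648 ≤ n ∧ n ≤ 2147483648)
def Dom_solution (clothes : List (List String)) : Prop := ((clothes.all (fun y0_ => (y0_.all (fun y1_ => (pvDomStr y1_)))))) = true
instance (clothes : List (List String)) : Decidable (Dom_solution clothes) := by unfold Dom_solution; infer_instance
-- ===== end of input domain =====

-- B replaces A's tally loop over parallel type_list/cnt lists by a recursive partition:
-- count the first remaining type, filter all its occurrences out, multiply (count+1), recurse.
-- Return-value equivalence only (neither mutates its argument).

-- ===== PORT A =====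
-- the per-item loop body of A: keeps the pair (type_list, cnt)
def solutionStep (st : List String × List Int) (t : String) : List String × List Int :=
  if t ∈ st.1 then
    match PySem.List.index? st.1 t with
    | some i => (st.1, st.2.modify i (· + 1))
    | none => st
  else
    (st.1 ++ [t], st.2 ++ [1])

def solution (clothes : List (List String)) : Int :=
  let st := clothes.foldl
    (fun st c => solutionStep st ((PySem.List.pyGet? c 1).getD ""))
    (([] : List String), ([] : List Int))
  let answer := st.2.foldl (fun a v => a * (v + 1)) (1 : Int)
  answer - 1

-- ===== PORT B =====
-- the inner recursive helper 'prod' of Source B: count the first type, filter it out, recurse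
def pvProd (types : List String) : Int :=
  match types with
  | [] => 1
  | t :: rest =>
      ((PySem.List.count (t :: rest) t : Int) + 1) *
        pvProd ((t :: rest).filter (fun x => !(x == t)))
termination_by types.length
decreasing_by
  simp only [List.filter_cons, beq_self_eq_true, Bool.not_true, List.length_cons]
  exact Nat.lt_succ_of_le (List.length_filter_le _ _)

def solution_alt (clothes : List (List String)) : Int :=
  pvProd (clothes.map (fun c => (PySem.List.pyGet? c 1).getD "")) - 1

-- ===== PRECONDITION & SPEC =====
-- Pre_ excludes exactly the rows on which Python A raises IndexError: an item with fewer than 2 entries.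
def Pre_solution (clothes : List (List String)) : Prop := ∀ c ∈ clothes, 2 ≤ c.length
instance (clothes : List (List String)) : Decidable (Pre_solution clothes) := by unfold Pre_solution; infer_instance
def pvWitness_solution : List (List String) := [["yellow_hat", "headgear"], ["blue_sunglasses", "eyewear"], ["green_turban", "headgear"]]

def Spec_solution (clothes : List (List String)) (out : Int) : Prop := out = solution_alt clothes
instance (clothes : List (List String)) (out : Int) : Decidable (Spec_solution clothes out) := by unfold Spec_solution; infer_instance

-- ===== CLAIM (what is proved, stated in full; the proofs are below) =====
def Claim_equal_solution : Prop := ∀ (clothes : List (List String)), Dom_solution clothes → Pre_solution clothes → Spec_solution clothes (solution clothes)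

-- ===== LEMMAS AND PROOFS =====

-- A's fold state over a key list ks is exactly (set of ks, counts of ks aligned with it)
theorem solution_state_eq (ks : List String) :
    ks.foldl solutionStep (([] : List String), ([] : List Int))
      = (PySem.Set.ofList ks, (PySem.Set.ofList ks).map (fun t => (ks.count t : Int))) := by
  induction ks using List.reverseRecOn with
  | nil => simp [PySem.Set.ofList]
  | append_singleton ks k ih =>
    rw [List.foldl_append, List.foldl_cons, List.foldl_nil, ih]
    have hof : PySem.Set.ofList (ks ++ [k]) = PySem.Set.add (PySem.Set.ofList ks) k := by
      simp [PySem.Set.ofList_eq_foldl, List.foldl_append]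
    by_cases hk : k ∈ PySem.Set.ofList ks
    · have hadd : PySem.Set.add (PySem.Set.ofList ks) k = PySem.Set.ofList ks := by
        simp [PySem.Set.add, PySem.Set.contains, hk]
      obtain ⟨i, hi⟩ := Option.isSome_iff_exists.1 ((PySem.List.index?_isSome_iff _ _).2 hk)
      obtain ⟨hilt, hik, hfirst⟩ := PySem.List.getElem_of_index?_eq_some hi
      have hnd := PySem.Set.nodup_ofList ks
      simp only [solutionStep, hk, if_pos, hi, hof, hadd]
      refine Prod.ext rfl ?_
      apply List.ext_getElem (by simp)
      intro j hj hj'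
      have hjl : j < (PySem.Set.ofList ks).length := by
        simpa using hj'
      rw [List.getElem_modify, List.getElem_map, List.getElem_map]
      by_cases hij : i = j
      · subst hij
        simp [hik, List.count_append]
      · have hne : (PySem.Set.ofList ks)[j] ≠ k := by
          intro h
          exact hij ((List.Nodup.getElem_inj_iff hnd).1 (hik.trans h.symm))
        simp [hij, List.count_append, List.count_eq_zero, hne]
    · have hkks : k ∉ ks := fun h => hk ((PySem.Set.mem_ofList ks k).2 h)
      have hadd : PySem.Set.add (PySem.Set.ofList ks) k = PySem.Set.ofList ks ++ [k] := by
        simp [PySem.Set.add, PySem.Set.contains, hk]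
      simp only [solutionStep, hk, if_neg, hof, hadd, not_false_iff]
      refine Prod.ext rfl ?_
      rw [List.map_append]
      refine congrArg₂ (· ++ ·) ?_ ?_
      · refine (List.map_congr_left ?_).symm
        intro t ht
        have htne : t ≠ k := fun h => hk (h ▸ ht)
        simp [List.count_append, List.count_eq_zero, htne]
      · simp [List.count_append, List.count_eq_zero, hkks]

-- multiply-accumulate fold is a product
theorem foldl_mul_prod (L : List Int) (a : Int) :
    L.foldl (fun a v => a * (v + 1)) a = a * (L.map (fun v => v + 1)).prod := by
  induction L generalizing a with
  | nil => simp
  | cons v L ih => simp [ih, mul_assoc]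

-- Set.add skips elements already present: a fold from a set containing t ignores t's
theorem foldl_add_filter (l : List String) (s : PySem.Set String) (t : String)
    (ht : t ∈ s) :
    l.foldl PySem.Set.add s = (l.filter (fun x => !(x == t))).foldl PySem.Set.add s := by
  induction l generalizing s with
  | nil => rfl
  | cons x l ih =>
    by_cases hx : x = t
    · subst hx
      have : PySem.Set.add s x = s := by simp [PySem.Set.add, PySem.Set.contains, ht]
      simp [this, ih s ht]
    · have hx' : (!(x == t)) = true := by simp [hx]
      simp only [List.filter_cons, hx', if_pos, List.foldl_cons]
      exact ih _ (by simp [PySem.Set.add]; split <;> simp [ht])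

-- a fold over elements none of which equals t keeps a leading [t] prefix intact
theorem foldl_add_prefix (l : List String) (s : List String) (t : String)
    (hl : ∀ x ∈ l, x ≠ t) (hs : t ∉ s) :
    l.foldl PySem.Set.add (t :: s) = t :: l.foldl PySem.Set.add s := by
  induction l generalizing s with
  | nil => rfl
  | cons x l ih =>
    have hxt : x ≠ t := hl x (by simp)
    have hcont : PySem.Set.contains (t :: s) x = PySem.Set.contains s x := by
      simp [PySem.Set.contains, hxt]
    simp only [List.foldl_cons]
    by_cases hx : x ∈ s
    · have h1 : PySem.Set.add (t :: s) x = t :: s := by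
        simp [PySem.Set.add, PySem.Set.contains, hx]
      have h2 : PySem.Set.add s x = s := by
        simp [PySem.Set.add, PySem.Set.contains, hx]
      rw [h1, h2]; exact ih s (fun y hy => hl y (by simp [hy])) hs
    · have h1 : PySem.Set.add (t :: s) x = t :: (s ++ [x]) := by
        simp [PySem.Set.add, PySem.Set.contains, hx, hxt]
      have h2 : PySem.Set.add s x = s ++ [x] := by
        simp [PySem.Set.add, PySem.Set.contains, hx]
      rw [h1, h2]
      exact ih (s ++ [x]) (fun y hy => hl y (by simp [hy]))
        (by simp [hs, Ne.symm hxt])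

-- first-occurrence dedup of t :: l = t followed by dedup of l with t's removed
theorem ofList_cons_filter (t : String) (l : List String) :
    PySem.Set.ofList (t :: l) = t :: PySem.Set.ofList (l.filter (fun x => !(x == t))) := by
  have h0 : PySem.Set.ofList (t :: l) = l.foldl PySem.Set.add [t] := by
    simp [PySem.Set.ofList_eq_foldl, PySem.Set.add, PySem.Set.contains]
  rw [h0, foldl_add_filter l [t] t (by simp)]
  have : ([t] : List String) = t :: ([] : List String) := rfl
  rw [this, foldl_add_prefix _ _ _ (fun x hx => by
        rcases List.mem_filter.1 hx with ⟨-, h⟩; simpa using h) (by simp)]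
  rw [PySem.Set.ofList_eq_foldl]

-- B's recursion computes the product of (count+1) over the distinct types
theorem pvProd_eq (n : Nat) : ∀ ks : List String, ks.length ≤ n →
    ((PySem.Set.ofList ks).map (fun t => (ks.count t : Int) + 1)).prod = pvProd ks := by
  induction n with
  | zero =>
    intro ks hks
    have : ks = [] := List.eq_nil_of_length_eq_zero (Nat.le_zero.1 hks)
    subst this; simp [pvProd, PySem.Set.ofList]
  | succ n ih =>
    intro ks hks
    match ks with
    | [] => simp [pvProd, PySem.Set.ofList]
    | t :: rest =>
      have hfil : (t :: rest).filter (fun x => !(x == t)) = rest.filter (fun x => !(x == t)) := by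
        simp
      rw [ofList_cons_filter, List.map_cons, List.prod_cons, pvProd, hfil]
      have hflen : (rest.filter (fun x => !(x == t))).length ≤ n := by
        have h1 := List.length_filter_le (fun x => !(x == t)) rest
        have h2 : rest.length ≤ n := by simpa using hks
        omega
      rw [← ih _ hflen]
      congr 1
      refine congrArg List.prod (List.map_congr_left ?_)
      intro x hx
      have hxmem : x ∈ rest.filter (fun x => !(x == t)) :=
        (PySem.Set.mem_ofList _ _).1 hx
      obtain ⟨hxr, hxtb⟩ := List.mem_filter.1 hxmem
      have hxt : x ≠ t := by simpa using hxtb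
      have h1 : (rest.filter (fun y => !(y == t))).count x = rest.count x :=
        List.count_filter (by simpa using hxt)
      have h2 : (t :: rest).count x = rest.count x := by
        simp [List.count_cons]
        exact fun h => hxt h.symm
      rw [h1, h2]

theorem solution_eq_alt (clothes : List (List String)) :
    solution clothes = solution_alt clothes := by
  unfold solution solution_alt
  set ks := clothes.map (fun c => (PySem.List.pyGet? c 1).getD "") with hks
  have hA : clothes.foldl
      (fun st c => solutionStep st ((PySem.List.pyGet? c 1).getD ""))
      (([] : List String), ([] : List Int)) = ks.foldl solutionStep ([], []) := by
    rw [hks, List.foldl_map]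
  simp only [hA, solution_state_eq, foldl_mul_prod, one_mul, List.map_map, Function.comp_def]
  rw [← pvProd_eq ks.length ks le_rfl]

-- ===== VERDICT (by name: the statement is the Claim_ definition above) =====
theorem solution_spec : Claim_equal_solution := by
  intro clothes _ _
  unfold Spec_solution
  exact solution_eq_alt clothes
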